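-- pv_equiv track=rewrite | github.com/8eomio/CodingTest | 기초/문자열_나누기.py | solution
-- ===== SOURCE A (Python) =====
-- def solution(s):
--     answer = 0
--     same = 1
--     diff = 0
--     x = s[0]
--     for string in s[1:]:
--         if same == diff:
--             answer += 1
--             x = string
--             same = 1
--             diff = 0
--             continue
--         if string != x:
--             diff += 1
--         elif string == x:
--             same += 1
--     return answer + 1
-- ===== SOURCE B (Python) =====
-- def solution(s):
--     n = len(s)
--     pivot = s[0]          # IndexError on empty input, like A
--     answer = 0
--     j = 0
--     while j < n:
--         answer += 1
--         pivot = s[j]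
--         bal = 1           # the pivot character itself
--         pos = j + 1
--         while True:
--             o = s.find(pivot, pos)
--             if o == -1:
--                 o = n
--             gap = o - pos            # run of non-pivot characters before the next pivot
--             if bal <= gap:           # the balance reaches 0 inside this run
--                 j = pos + bal
--                 break
--             if o == n:               # no further pivot: the final group never closes
--                 j = n
--                 break
--             bal += 1 - gap           # consume the run and the pivot occurrence at o
--             pos = o + 1
--     return answer
-- ===== Notes on version B (the rewrite author's own statement) =====
-- stated objective: alternative
-- what changed: B does not inspect characters one by one: it jumps from one pivot occurrence to the next with str.find and computes the position where the balance reaches zero arithmetically from the run lengths, instead of A's per-character loop maintaining same/diff counters.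
import Mathlib
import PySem

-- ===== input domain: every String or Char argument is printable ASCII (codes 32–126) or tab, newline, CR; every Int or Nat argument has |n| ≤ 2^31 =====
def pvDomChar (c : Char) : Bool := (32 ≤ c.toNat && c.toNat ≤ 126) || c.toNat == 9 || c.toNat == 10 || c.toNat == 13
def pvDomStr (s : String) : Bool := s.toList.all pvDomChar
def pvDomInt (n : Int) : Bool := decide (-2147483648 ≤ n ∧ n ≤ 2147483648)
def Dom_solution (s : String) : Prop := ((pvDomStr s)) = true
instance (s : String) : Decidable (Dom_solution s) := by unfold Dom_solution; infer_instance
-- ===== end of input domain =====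

-- B replaces A's per-character loop with same/diff counters by jumps between pivot
-- occurrences via str.find, locating the zero crossing of the balance arithmetically
-- (objective: alternative; same asymptotic cost).

-- ===== PORT A =====
-- A's for-loop over s[1:] with state (answer, x, same, diff); branch order as in Python.
def solutionLoopA : List Char → Int → Char → Int → Int → Int
  | [], ans, _, _, _ => ans
  | c :: cs, ans, x, same, diff =>
    if same = diff then solutionLoopA cs (ans + 1) c 1 0
    else if c ≠ x then solutionLoopA cs ans x same (diff + 1)
    else if c = x then solutionLoopA cs ans x (same + 1) diff
    else solutionLoopA cs ans x same diff

-- x = s[0] raises IndexError on the empty string (excluded by Pre_solution); 0 is a dummy there.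
def solution (s : String) : Int :=
  match s.toList with
  | [] => 0
  | c :: cs => solutionLoopA cs 0 c 1 0 + 1

-- ===== PORT B =====
-- inner while loop of Source B: o = s.find(pivot, pos); either the balance reaches 0 inside the
-- run of non-pivot characters (return pos + bal), or the group never closes (return n), or
-- consume the run and the pivot occurrence and continue.  The dite guard only makes the
-- recursion total; it always holds (s.find returns pos ≤ o < n on this branch).
def innerB (s : String) (n : Int) (pivot : Char) (bal pos : Int) : Int :=
  let o0 := PySem.Str.findFrom s (String.ofList [pivot]) pos
  let o := if o0 = -1 then n else o0
  let gap := o - pos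
  if bal ≤ gap then pos + bal
  else if o = n then n
  else if h : (n - (o + 1)).toNat < (n - pos).toNat then innerB s n pivot (bal + (1 - gap)) (o + 1)
  else n
termination_by (n - pos).toNat
decreasing_by exact h

-- outer while loop of Source B over groups; state (answer, j).  The 'none' and '¬ j < j'' arms
-- are totality guards only: j < n makes s[j] defined, and the inner loop returns j' > j.
def outerB (s : String) (n : Int) (answer j : Int) : Int :=
  if _h1 : j < n then
    match PySem.Str.pyGet? s j with
    | none => answer + 1
    | some pivot =>
      let j' := innerB s n pivot 1 (j + 1)
      if _h2 : j < j' then outerB s n (answer + 1) j' else answer + 1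
  else answer
termination_by (n - j).toNat
decreasing_by omega

-- pivot = s[0] raises IndexError on the empty string (excluded by Pre_solution); 0 is a dummy there.
def solution_alt (s : String) : Int :=
  let n := PySem.Str.len s
  match PySem.Str.pyGet? s 0 with
  | none => 0
  | some _ => outerB s n 0 0

-- ===== PRECONDITION & SPEC =====
-- Pre_ excludes only the empty string, on which A's s[0] raises IndexError.
def Pre_solution (s : String) : Prop := s ≠ ""
instance (s : String) : Decidable (Pre_solution s) := by unfold Pre_solution; infer_instance
def pvWitness_solution : String := "aabbaccc"

def Spec_solution (s : String) (out : Int) : Prop := out = solution_alt s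
instance (s : String) (out : Int) : Decidable (Spec_solution s out) := by unfold Spec_solution; infer_instance

-- ===== CLAIM (what is proved, stated in full; the proofs are below) =====
def Claim_equal_solution : Prop := ∀ (s : String), Dom_solution s → Pre_solution s → Spec_solution s (solution s)

-- ===== LEMMAS AND PROOFS =====

-- Proof-side reference semantics: consume one group character by character with a signed
-- balance; both ports are proved equal to `solutionGroups`.
def solutionSkip (pivot : Char) : Int → List Char → List Char
  | _, [] => []
  | bal, c :: cs =>
    let b := bal + (if c = pivot then 1 else -1)
    if b = 0 then cs else solutionSkip pivot b cs

theorem solutionSkip_length_le (pivot : Char) : ∀ (bal : Int) (l : List Char),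
    (solutionSkip pivot bal l).length ≤ l.length := by
  intro bal l
  induction l generalizing bal with
  | nil => simp [solutionSkip]
  | cons c cs ih =>
    simp only [solutionSkip]
    split <;> split <;> first | exact Nat.le_succ_of_le (ih _) | simp

def solutionGroups : List Char → Int
  | [] => 0
  | c :: cs => 1 + solutionGroups (solutionSkip c 1 cs)
termination_by l => l.length
decreasing_by
  exact Nat.lt_succ_of_le (solutionSkip_length_le c 1 cs)

-- ---- A-side: the counter loop equals the reference semantics ----
theorem solutionLoopA_eq_groups : ∀ (l : List Char) (ans : Int) (x : Char) (same diff : Int),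
    solutionLoopA l ans x same diff =
      ans + (if same = diff then solutionGroups l
             else solutionGroups (solutionSkip x (same - diff) l)) := by
  intro l
  induction l with
  | nil => intro ans x same diff; simp [solutionLoopA, solutionGroups, solutionSkip]
  | cons c cs ih =>
    intro ans x same diff
    by_cases h : same = diff
    · have e1 : solutionLoopA (c :: cs) ans x same diff = solutionLoopA cs (ans + 1) c 1 0 := by
        rw [solutionLoopA, if_pos h]
      rw [e1, ih, if_neg (show (1 : Int) ≠ 0 by norm_num), if_pos h,
        show (1 : Int) - 0 = 1 from by ring, solutionGroups]
      ring
    · by_cases hc : c = x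
      · subst hc
        have e1 : solutionLoopA (c :: cs) ans c same diff = solutionLoopA cs ans c (same + 1) diff := by
          rw [solutionLoopA, if_neg h]; simp
        have e2 : solutionSkip c (same - diff) (c :: cs) =
            if same - diff + 1 = 0 then cs else solutionSkip c (same - diff + 1) cs := by
          simp [solutionSkip]
        rw [e1, ih, if_neg h, e2]
        by_cases h1 : same + 1 = diff
        · rw [if_pos h1, if_pos (show same - diff + 1 = 0 by omega)]
        · rw [if_neg h1, if_neg (show same - diff + 1 ≠ 0 by omega),
            show same + 1 - diff = same - diff + 1 from by ring]
      · have e1 : solutionLoopA (c :: cs) ans x same diff = solutionLoopA cs ans x same (diff + 1) := by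
          rw [solutionLoopA, if_neg h, if_pos hc]
        have e2 : solutionSkip x (same - diff) (c :: cs) =
            if same - diff + -1 = 0 then cs else solutionSkip x (same - diff + -1) cs := by
          simp [solutionSkip, hc]
        rw [e1, ih, if_neg h, e2]
        by_cases h1 : same = diff + 1
        · rw [if_pos h1, if_pos (show same - diff + -1 = 0 by omega)]
        · rw [if_neg h1, if_neg (show same - diff + -1 ≠ 0 by omega),
            show same - (diff + 1) = same - diff + -1 from by ring]

-- ---- generic facts about solutionSkip and single-character prefixes ----

-- a singleton is a prefix of l.drop i iff l[i]? = p
theorem singleton_prefix_drop {p : Char} {l : List Char} {i : Nat} :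
    [p] <+: l.drop i ↔ l[i]? = some p := by
  rw [show l[i]? = (l.drop i)[0]? from by simp]
  cases h : l.drop i with
  | nil => simp [List.prefix_iff_eq_take]
  | cons a t =>
    constructor
    · rintro ⟨u, hu⟩
      simp only [List.singleton_append] at hu
      cases hu; simp
    · intro hh
      simp only [List.getElem?_cons_zero, Option.some.injEq] at hh
      exact ⟨t, by simp [hh]⟩

theorem singleton_infix_iff_mem {p : Char} {l : List Char} : [p] <:+: l ↔ p ∈ l := by
  constructor
  · intro h; exact h.subset (by simp)
  · intro h
    obtain ⟨u, v, rfl⟩ := List.append_of_mem h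
    exact ⟨u, v, by simp⟩

theorem all_take_ne {p : Char} {l : List Char} {m : Nat}
    (h : ∀ i < m, l[i]? ≠ some p) : ∀ x ∈ l.take m, x ≠ p := by
  intro x hx
  rw [List.mem_take_iff_getElem] at hx
  obtain ⟨i, hi, rfl⟩ := hx
  have h1 : i < m := lt_of_lt_of_le hi (min_le_left _ _)
  have h2 : i < l.length := lt_of_lt_of_le hi (min_le_right _ _)
  intro hp
  exact h i h1 (by rw [List.getElem?_eq_getElem h2, hp])

-- consuming a run of non-pivot characters shorter than the balance
theorem skip_run_lt (p : Char) : ∀ (pre suf : List Char), (∀ x ∈ pre, x ≠ p) →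
    ∀ bal : Int, (pre.length : Int) < bal →
    solutionSkip p bal (pre ++ suf) = solutionSkip p (bal - pre.length) suf := by
  intro pre
  induction pre with
  | nil => intro suf _ bal _; simp
  | cons a pre' ih =>
    intro suf hne bal hlt
    have ha : a ≠ p := hne a (by simp)
    have e : solutionSkip p bal (a :: (pre' ++ suf)) =
        if bal + -1 = 0 then pre' ++ suf else solutionSkip p (bal + -1) (pre' ++ suf) := by
      simp [solutionSkip, ha]
    simp only [List.cons_append, e]
    have hlen : ((a :: pre').length : Int) = (pre'.length : Int) + 1 := by
      push_cast [List.length_cons]; ring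
    rw [hlen] at hlt
    rw [if_neg (by omega), ih suf (fun x hx => hne x (by simp [hx])) (bal + -1) (by omega)]
    congr 1
    rw [hlen]
    ring

-- the balance reaches 0 inside a run of non-pivot characters
theorem skip_run_le (p : Char) : ∀ (pre suf : List Char), (∀ x ∈ pre, x ≠ p) →
    ∀ bal : Int, 1 ≤ bal → bal ≤ (pre.length : Int) →
    solutionSkip p bal (pre ++ suf) = pre.drop bal.toNat ++ suf := by
  intro pre
  induction pre with
  | nil => intro suf _ bal h1 h2; simp at h2; omega
  | cons a pre' ih =>
    intro suf hne bal h1 h2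
    have ha : a ≠ p := hne a (by simp)
    have e : solutionSkip p bal (a :: (pre' ++ suf)) =
        if bal + -1 = 0 then pre' ++ suf else solutionSkip p (bal + -1) (pre' ++ suf) := by
      simp [solutionSkip, ha]
    simp only [List.cons_append, e]
    by_cases hb : bal = 1
    · subst hb
      rw [if_pos (by ring)]
      simp
    · have hlen : ((a :: pre').length : Int) = (pre'.length : Int) + 1 := by push_cast [List.length_cons]; ring
      rw [hlen] at h2
      rw [if_neg (by omega), ih suf (fun x hx => hne x (by simp [hx])) (bal + -1) (by omega) (by omega)]
      have : (a :: pre').drop bal.toNat = pre'.drop (bal + -1).toNat := by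
        have : bal.toNat = (bal + -1).toNat + 1 := by omega
        simp [this]
      rw [this]

theorem skip_all_ne (p : Char) (l : List Char) (h : ∀ x ∈ l, x ≠ p) (bal : Int)
    (hlt : (l.length : Int) < bal) : solutionSkip p bal l = [] := by
  have := skip_run_lt p l [] h bal hlt
  simpa [solutionSkip] using this

-- ---- B-side: the find-jump inner loop computes the end of the current group ----

theorem innerB_spec (s : String) (p : Char) : ∀ (m pos : Nat) (bal : Int),
    s.toList.length - pos ≤ m → pos ≤ s.toList.length → 1 ≤ bal →
    ∃ k : Nat, innerB s (s.toList.length : Int) p bal (pos : Int) = (k : Int) ∧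
      pos ≤ k ∧ k ≤ s.toList.length ∧
      s.toList.drop k = solutionSkip p bal (s.toList.drop pos) := by
  intro m
  induction m with
  | zero =>
    intro pos bal hm hpos _
    have hpn : pos = s.toList.length := by omega
    subst hpn
    have hdrop : s.toList.drop s.toList.length = ([] : List Char) := List.drop_length
    have hfind : PySem.Chars.find (s.toList.drop s.toList.length) [p] = -1 := by
      rw [PySem.Chars.find_eq_neg_one_iff, hdrop, singleton_infix_iff_mem]
      simp
    have hfe : PySem.Str.findFrom s (String.ofList [p]) (s.toList.length : Int) = -1 := by
      rw [PySem.Str.findFrom_eq, String.toList_ofList,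
        PySem.Chars.findFrom_natCast s.toList [p] s.toList.length (le_refl _), hfind]
      simp
    refine ⟨s.toList.length, ?_, le_refl _, le_refl _, by rw [hdrop]; simp [solutionSkip]⟩
    rw [innerB, hfe, if_pos (show (-1 : Int) = -1 from rfl),
      if_neg (show ¬ bal ≤ (s.toList.length : Int) - (s.toList.length : Int) from by omega),
      if_pos (show ((s.toList.length : Int)) = (s.toList.length : Int) from rfl)]
  | succ m ih =>
    intro pos bal hm hpos hbal
    set L := s.toList with hL
    set n := L.length with hn
    have hfe : PySem.Str.findFrom s (String.ofList [p]) (pos : Int) =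
        if PySem.Chars.find (L.drop pos) [p] = -1 then -1
        else (pos : Int) + PySem.Chars.find (L.drop pos) [p] := by
      rw [PySem.Str.findFrom_eq, String.toList_ofList]
      exact PySem.Chars.findFrom_natCast L [p] pos hpos
    set f := PySem.Chars.find (L.drop pos) [p] with hfdef
    have hfge : -1 ≤ f := PySem.Chars.neg_one_le_find _ _
    by_cases hf : f = -1
    · -- no pivot occurrence after pos
      have hnmem : ∀ x ∈ L.drop pos, x ≠ p := by
        intro x hx hxp
        rw [hfdef, PySem.Chars.find_eq_neg_one_iff] at hf
        exact hf (singleton_infix_iff_mem.mpr (hxp ▸ hx))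
      have hgap : ((L.drop pos).length : Int) = (n : Int) - pos := by
        simp [hn]; omega
      by_cases hb : bal ≤ (n : Int) - pos
      · -- balance reaches 0 inside the final run
        refine ⟨pos + bal.toNat, ?_, by omega, by omega, ?_⟩
        · rw [innerB, hfe, if_pos hf, if_pos (show (-1 : Int) = -1 from rfl),
            if_pos (show bal ≤ (n : Int) - (pos : Int) from by omega)]
          omega
        · have hdec := List.take_append_drop bal.toNat (L.drop pos)
          have hlen : ((L.drop pos).take bal.toNat).length = bal.toNat := by
            simp; omega
          rw [← hdec, skip_run_le p _ _ (fun x hx => hnmem x (List.mem_of_mem_take hx)) bal hbal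
            (by rw [hlen]; omega)]
          rw [List.drop_take, List.drop_drop]
          have : bal.toNat - bal.toNat = 0 := by omega
          rw [this]
          simp
      · -- the final group never closes
        refine ⟨n, ?_, hpos, le_refl _, ?_⟩
        · rw [innerB, hfe, if_pos hf, if_pos (show (-1 : Int) = -1 from rfl),
            if_neg (show ¬ bal ≤ (n : Int) - (pos : Int) from by omega),
            if_pos (show ((n : Int)) = (n : Int) from rfl)]
        · rw [List.drop_length, skip_all_ne p _ hnmem bal (by omega)]
    · -- f ≥ 0 : pivot occurs first at index pos + f
      have hf0 : 0 ≤ f := by omega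
      obtain ⟨hpre, hmin⟩ := PySem.Chars.find_spec (s := L.drop pos) (sub := [p]) hf0
      have hat : (L.drop pos)[f.toNat]? = some p := singleton_prefix_drop.mp hpre
      have hflt : f.toNat < (L.drop pos).length := by
        by_contra hc
        rw [List.getElem?_eq_none (by omega)] at hat
        simp at hat
      have hlend : (L.drop pos).length = n - pos := by simp [hn]
      have hfltn : pos + f.toNat < n := by omega
      have ho0 : ¬ ((pos : Int) + f = -1) := by omega
      have hnein : ∀ i < f.toNat, ¬ (L.drop pos)[i]? = some p := by
        intro i hi hc
        exact hmin i hi (singleton_prefix_drop.mpr hc)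
      by_cases hb : bal ≤ f
      · -- balance reaches 0 inside the run before the occurrence
        refine ⟨pos + bal.toNat, ?_, by omega, by omega, ?_⟩
        · rw [innerB, hfe, if_neg hf, if_neg ho0,
            if_pos (show bal ≤ (pos : Int) + f - (pos : Int) from by omega)]
          omega
        · have hdec := List.take_append_drop bal.toNat (L.drop pos)
          have hlen : ((L.drop pos).take bal.toNat).length = bal.toNat := by
            simp; omega
          have hnet : ∀ x ∈ (L.drop pos).take bal.toNat, x ≠ p :=
            all_take_ne (fun i hi => hnein i (by omega))
          rw [← hdec, skip_run_le p _ _ hnet bal hbal (by rw [hlen]; omega)]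
          rw [List.drop_take, List.drop_drop]
          have : bal.toNat - bal.toNat = 0 := by omega
          rw [this]
          simp
      · -- jump over the run and the pivot occurrence, recurse
        obtain ⟨rest, hrest⟩ : ∃ rest, (L.drop pos).drop f.toNat = p :: rest := by
          obtain ⟨u, hu⟩ := hpre
          exact ⟨u, by simpa using hu.symm⟩
        have hrest2 : rest = L.drop (pos + f.toNat + 1) := by
          have : rest = ((L.drop pos).drop f.toNat).drop 1 := by rw [hrest]; simp
          rw [this, List.drop_drop, List.drop_drop]
          congr 1
        have hskip_eq : solutionSkip p bal (L.drop pos) =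
            solutionSkip p (bal + (1 - f)) (L.drop (pos + f.toNat + 1)) := by
          have hdec := List.take_append_drop f.toNat (L.drop pos)
          have hlen : ((L.drop pos).take f.toNat).length = f.toNat := by simp; omega
          have hnet : ∀ x ∈ (L.drop pos).take f.toNat, x ≠ p := all_take_ne hnein
          rw [← hdec, hrest, skip_run_lt p _ _ hnet bal (by rw [hlen]; omega)]
          have e : solutionSkip p (bal - ((L.drop pos).take f.toNat).length) (p :: rest) =
              if bal - ((L.drop pos).take f.toNat).length + 1 = 0 then rest
              else solutionSkip p (bal - ((L.drop pos).take f.toNat).length + 1) rest := by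
            simp [solutionSkip]
          rw [e, hlen, if_neg (by omega), hrest2]
          congr 1
          omega
        obtain ⟨k, hk1, hk2, hk3, hk4⟩ := ih (pos + f.toNat + 1) (bal + (1 - f))
          (by omega) (by omega) (by omega)
        refine ⟨k, ?_, by omega, hk3, by rw [hskip_eq, ← hk4]⟩
        rw [innerB, hfe, if_neg hf, if_neg ho0,
          if_neg (show ¬ bal ≤ (pos : Int) + f - (pos : Int) from by omega),
          if_neg (show ¬ ((pos : Int) + f = (n : Int)) from by omega),
          dif_pos (show ((n : Int) - ((pos : Int) + f + 1)).toNat < ((n : Int) - (pos : Int)).toNat from by omega)]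
        have harg1 : bal + (1 - ((pos : Int) + f - pos)) = bal + (1 - f) := by ring_nf
        have harg2 : (pos : Int) + f + 1 = ((pos + f.toNat + 1 : Nat) : Int) := by
          push_cast; omega
        rw [harg1, harg2]
        exact hk1

-- the outer loop accumulates one group per iteration
theorem outerB_spec (s : String) : ∀ (m j : Nat) (ans : Int),
    s.toList.length - j ≤ m → j ≤ s.toList.length →
    outerB s (s.toList.length : Int) ans (j : Int) = ans + solutionGroups (s.toList.drop j) := by
  intro m
  induction m with
  | zero =>
    intro j ans hm hj
    have : j = s.toList.length := by omega
    subst this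
    rw [outerB, dif_neg (by omega), List.drop_length]
    simp [solutionGroups]
  | succ m ih =>
    intro j ans hm hj
    by_cases hjn : j < s.toList.length
    · have hget : PySem.Str.pyGet? s (j : Int) = some s.toList[j] := by
        rw [PySem.Str.pyGet?_eq]
        exact PySem.List.pyGet?_ofNat s.toList j hjn
      obtain ⟨k, hk1, hk2, hk3, hk4⟩ := innerB_spec s s.toList[j] m (j + 1) 1
        (by omega) (by omega) (le_refl _)
      have harg : (j : Int) + 1 = ((j + 1 : Nat) : Int) := by push_cast [List.length_cons]; ring
      rw [outerB, dif_pos (by omega), hget]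
      simp only [harg, hk1]
      rw [dif_pos (by omega), ih k (ans + 1) (by omega) hk3]
      have hdropj : s.toList.drop j = s.toList[j] :: s.toList.drop (j + 1) :=
        List.drop_eq_getElem_cons hjn
      rw [hdropj, solutionGroups, ← hk4]
      ring
    · have : j = s.toList.length := by omega
      subst this
      rw [outerB, dif_neg (by omega), List.drop_length]
      simp [solutionGroups]

-- ===== VERDICT (by name: the statement is the Claim_ definition above) =====
theorem solution_spec : Claim_equal_solution := by
  intro s _ _
  unfold Spec_solution solution solution_alt
  cases h : s.toList with
  | nil =>
    have hg : PySem.Str.pyGet? s 0 = none := by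
      rw [PySem.Str.pyGet?_eq, h]
      rfl
    simp only [hg]
  | cons c cs =>
    have hg : PySem.Str.pyGet? s 0 = some c := by
      rw [PySem.Str.pyGet?_eq, h]
      simp [PySem.Chars.pyGet?, PySem.List.pyGet?, PySem.List.pyIdx?]
    have hlen : PySem.Str.len s = (s.toList.length : Int) := by
      simp [PySem.Str.len_eq]
    simp only [hg, hlen]
    have := outerB_spec s s.toList.length 0 0 (by omega) (by omega)
    simp only [Nat.cast_zero, List.drop_zero] at this
    rw [this, h]
    rw [solutionLoopA_eq_groups, if_neg (show (1 : Int) ≠ 0 by norm_num),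
      show (1 : Int) - 0 = 1 from by ring, solutionGroups]
    ring
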